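-- pv_equiv track=rewrite | github.com/Fiddle-N/advent-of-code | src/advent_of_code/puzzles/year_2020/day_23/process.py | _get_destination_cup
-- ===== SOURCE A (Python) =====
-- def _get_destination_cup(cups, start):
--     destination = start - 1
--     while True:
--         if destination in cups:
--             return destination
--         elif destination == 0:
--             destination = max(cups)
--         else:
--             destination -= 1
-- ===== SOURCE B (Python) =====
-- def _get_destination_cup(cups, start):
--     below = [c for c in cups if 0 <= c < start]
--     return max(below) if below else max(cups)
-- ===== Notes on version B (the rewrite author's own statement) =====
-- stated objective: simpler
-- what changed: Replaces the descending probe-with-wraparound loop by a single filtered max: return the largest cup in [0, start-1], else max(cups).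
-- outside the precondition, e.g. on _get_destination_cup({5, -3}, 0): A returns -3, B returns 5; on _get_destination_cup({5}, 0): A does not finish within the time limit, B returns 5; on _get_destination_cup(set(), 1): A raises ValueError, B raises ValueError
import Mathlib
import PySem

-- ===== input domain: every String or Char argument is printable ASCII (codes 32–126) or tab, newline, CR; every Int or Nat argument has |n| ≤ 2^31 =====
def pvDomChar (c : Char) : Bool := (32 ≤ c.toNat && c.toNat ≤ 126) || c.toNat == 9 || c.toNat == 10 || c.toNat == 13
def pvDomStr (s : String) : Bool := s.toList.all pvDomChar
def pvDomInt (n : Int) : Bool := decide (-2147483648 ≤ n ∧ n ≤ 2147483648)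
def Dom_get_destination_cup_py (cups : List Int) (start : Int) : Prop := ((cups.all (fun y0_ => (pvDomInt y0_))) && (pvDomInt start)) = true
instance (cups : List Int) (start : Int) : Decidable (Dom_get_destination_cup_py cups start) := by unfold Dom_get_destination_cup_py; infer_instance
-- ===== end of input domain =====

-- B replaces A's descending probe-with-wraparound loop by a single filtered max
-- (objective: simpler); equivalence is claimed on nonempty cups with start ≥ 1.

-- ===== PORT A =====
-- Python max(xs): none (ValueError on empty list) is excluded by Pre_; the getD 0 default is unreachable there.
def pyMaxInt (xs : List Int) : Int := (PySem.List.max? xs (fun x => x)).getD 0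

-- the `while True` loop; fuel only makes the recursion total (under Pre_ the loop
-- returns within (start-1).toNat + 2 iterations, so the 0-fuel default is unreachable)
def getDestLoop (cups : List Int) : Int → Nat → Int
  | _, 0 => 0
  | d, n + 1 =>
    if d ∈ cups then d
    else if d = 0 then getDestLoop cups (pyMaxInt cups) n
    else getDestLoop cups (d - 1) n

def get_destination_cup_py (cups : List Int) (start : Int) : Int :=
  getDestLoop cups (start - 1) ((start - 1).toNat + 2)

-- ===== PORT B =====
def get_destination_cup_py_alt (cups : List Int) (start : Int) : Int :=
  let below := cups.filter (fun c => decide (0 ≤ c) && decide (c < start))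
  if below.isEmpty then pyMaxInt cups else pyMaxInt below

-- ===== PRECONDITION & SPEC =====
-- Pre_ excludes empty cups (max raises ValueError) and start ≤ 0, which is outside
-- the puzzle's domain (cup labels start at 1): there A's downward scan diverges
-- unless some cup ≤ start - 1 exists.
def Pre_get_destination_cup_py (cups : List Int) (start : Int) : Prop :=
  cups ≠ [] ∧ 1 ≤ start
instance (cups : List Int) (start : Int) : Decidable (Pre_get_destination_cup_py cups start) := by
  unfold Pre_get_destination_cup_py; infer_instance

def pvWitness_get_destination_cup_py : List Int × Int := ([3, 8, 9, 1, 2, 5, 4, 6, 7], 3)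

def Spec_get_destination_cup_py (cups : List Int) (start : Int) (out : Int) : Prop :=
  out = get_destination_cup_py_alt cups start
instance (cups : List Int) (start : Int) (out : Int) : Decidable (Spec_get_destination_cup_py cups start out) := by
  unfold Spec_get_destination_cup_py; infer_instance

-- ===== CLAIM (what is proved, stated in full; the proofs are below) =====
def Claim_equal_get_destination_cup_py : Prop := ∀ (cups : List Int) (start : Int), Dom_get_destination_cup_py cups start → Pre_get_destination_cup_py cups start → Spec_get_destination_cup_py cups start (get_destination_cup_py cups start)

-- ===== LEMMAS AND PROOFS =====

-- the value B computes from an upper probe bound d (c ≤ d, i.e. c < d + 1)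
def altOf (cups : List Int) (d : Int) : Int :=
  let below := cups.filter (fun c => decide (0 ≤ c) && decide (c ≤ d))
  if below.isEmpty then pyMaxInt cups else pyMaxInt below

theorem pyMaxInt_spec (xs : List Int) (hne : xs ≠ []) :
    pyMaxInt xs ∈ xs ∧ ∀ y ∈ xs, y ≤ pyMaxInt xs := by
  unfold pyMaxInt
  cases hm : PySem.List.max? xs (fun x => x) with
  | none => exact absurd ((PySem.List.max?_eq_none_iff xs (fun x => x)).mp hm) hne
  | some m =>
    simp only [Option.getD_some]
    exact ⟨PySem.List.max?_mem hm, fun y hy => PySem.List.max?_isMax hm y hy⟩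

theorem altOf_mem_max (cups : List Int) (d : Int) (hd : d ∈ cups) (h0 : 0 ≤ d) :
    altOf cups d = d := by
  unfold altOf
  have hdf : d ∈ cups.filter (fun c => decide (0 ≤ c) && decide (c ≤ d)) := by
    simp [List.mem_filter, hd, h0]
  have hne : cups.filter (fun c => decide (0 ≤ c) && decide (c ≤ d)) ≠ [] :=
    fun h => by simp [h] at hdf
  simp only [List.isEmpty_eq_false_iff.mpr hne]
  obtain ⟨hmem, hmax⟩ := pyMaxInt_spec _ hne
  have h1 : pyMaxInt (cups.filter (fun c => decide (0 ≤ c) && decide (c ≤ d))) ≤ d := by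
    have h2 := (List.mem_filter.mp hmem).2
    simp only [Bool.and_eq_true, decide_eq_true_eq] at h2
    exact h2.2
  exact le_antisymm h1 (hmax d hdf)

theorem altOf_step (cups : List Int) (d : Int) (hd : d ∉ cups) :
    altOf cups (d - 1) = altOf cups d := by
  unfold altOf
  have hf : cups.filter (fun c => decide (0 ≤ c) && decide (c ≤ d - 1))
      = cups.filter (fun c => decide (0 ≤ c) && decide (c ≤ d)) := by
    apply List.filter_congr
    intro c hc
    have hcd : c ≠ d := fun h => hd (h ▸ hc)
    congr 1
    simp only [decide_eq_decide]
    omega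
  rw [hf]

theorem getDestLoop_spec (cups : List Int) (hne : cups ≠ []) :
    ∀ (n : Nat) (d : Int), 0 ≤ d → d.toNat + 2 ≤ n →
      getDestLoop cups d n = altOf cups d := by
  intro n
  induction n with
  | zero => intro d _ hfuel; omega
  | succ k ih =>
    intro d h0 hfuel
    rw [getDestLoop]
    by_cases hd : d ∈ cups
    · rw [if_pos hd, altOf_mem_max cups d hd h0]
    · rw [if_neg hd]
      by_cases hz : d = 0
      · rw [if_pos hz]
        -- k ≥ 1, and the wrapped destination max(cups) ∈ cups returns immediately
        have hk : ∃ m, k = m + 1 := by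
          refine ⟨k - 1, ?_⟩
          omega
        obtain ⟨m, rfl⟩ := hk
        rw [getDestLoop]
        obtain ⟨hmem, hmax⟩ := pyMaxInt_spec cups hne
        rw [if_pos hmem]
        -- RHS: the filter up to d = 0 is empty since 0 ∉ cups
        have hemp : cups.filter (fun c => decide (0 ≤ c) && decide (c ≤ d)) = [] := by
          rw [List.filter_eq_nil_iff]
          intro c hc
          simp only [Bool.and_eq_true, decide_eq_true_eq, not_and]
          intro h1 h2
          have : c = 0 := by omega
          exact hd (by rwa [hz, ← this])
        unfold altOf
        simp [hemp]
      · rw [if_neg hz]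
        have h1 : (1:Int) ≤ d := by omega
        rw [ih (d - 1) (by omega) (by omega), altOf_step cups d hd]

theorem alt_eq_altOf (cups : List Int) (start : Int) :
    get_destination_cup_py_alt cups start = altOf cups (start - 1) := by
  unfold get_destination_cup_py_alt altOf
  have hf : cups.filter (fun c => decide (0 ≤ c) && decide (c < start))
      = cups.filter (fun c => decide (0 ≤ c) && decide (c ≤ start - 1)) := by
    apply List.filter_congr
    intro c _
    congr 1
    simp only [decide_eq_decide]
    omega
  rw [hf]

-- ===== VERDICT (by name: the statement is the Claim_ definition above) =====
theorem get_destination_cup_py_spec : Claim_equal_get_destination_cup_py := by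
  intro cups start _ hpre
  obtain ⟨hne, hstart⟩ := hpre
  unfold Spec_get_destination_cup_py get_destination_cup_py
  rw [getDestLoop_spec cups hne _ (start - 1) (by omega) (by omega), alt_eq_altOf]
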